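-- pv_equiv track=rewrite | github.com/alexh-scrt/musequill.v3 | musequill/v3/components/orchestration/enhanced_pipeline_orchestrator.py | _infer_emotional_expressiveness
-- ===== SOURCE A (Python) =====
-- from typing import Dict, List, Any, Optional, Callable
--
-- def _infer_emotional_expressiveness(traits: List[str]) -> str:
--     """Infer emotional expressiveness from personality traits."""
--     traits_lower = [t.lower() for t in traits] if traits else []
--
--     if any(trait in traits_lower for trait in ['dramatic', 'expressive', 'passionate', 'emotional']):
--         return "expressive"
--     elif any(trait in traits_lower for trait in ['reserved', 'stoic', 'controlled', 'calm']):
--         return "reserved"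
--     elif any(trait in traits_lower for trait in ['intense', 'fiery', 'volatile']):
--         return "dramatic"
--     else:
--         return "moderate"
-- ===== SOURCE B (Python) =====
-- from typing import List
--
-- _PRIORITY = {
--     'dramatic': 0, 'expressive': 0, 'passionate': 0, 'emotional': 0,
--     'reserved': 1, 'stoic': 1, 'controlled': 1, 'calm': 1,
--     'intense': 2, 'fiery': 2, 'volatile': 2,
-- }
-- _LABELS = ('expressive', 'reserved', 'dramatic', 'moderate')
--
--
-- def _infer_emotional_expressiveness(traits: List[str]) -> str:
--     """Single pass: map each trait to a priority rank, keep the minimum."""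
--     best = 3
--     for t in traits:
--         best = min(best, _PRIORITY.get(t.lower(), 3))
--     return _LABELS[best]
-- ===== Notes on version B (the rewrite author's own statement) =====
-- stated objective: alternative
-- what changed: Replaces four category-by-category any() scans over the lowered trait list with a single pass over the traits that maps each lowered trait to a priority rank via one keyword->rank dict and keeps the minimum rank, indexing the label tuple at the end.
import Mathlib
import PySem

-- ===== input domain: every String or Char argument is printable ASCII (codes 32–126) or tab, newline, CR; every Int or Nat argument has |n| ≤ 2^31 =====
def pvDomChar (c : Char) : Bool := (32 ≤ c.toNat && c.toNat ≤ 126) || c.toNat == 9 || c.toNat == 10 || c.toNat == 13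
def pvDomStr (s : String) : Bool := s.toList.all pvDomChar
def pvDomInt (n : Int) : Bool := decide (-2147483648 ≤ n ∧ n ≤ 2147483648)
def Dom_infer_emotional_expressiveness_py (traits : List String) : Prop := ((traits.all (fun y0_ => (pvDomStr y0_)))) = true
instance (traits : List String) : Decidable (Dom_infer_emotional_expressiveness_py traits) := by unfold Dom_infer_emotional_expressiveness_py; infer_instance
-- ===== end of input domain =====

-- B is an alternative single-pass algorithm (keyword->rank dict, minimum rank); return value proved equal to A's on all inputs.

-- ===== PORT A =====
def pvKws0 : List String := ["dramatic", "expressive", "passionate", "emotional"]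
def pvKws1 : List String := ["reserved", "stoic", "controlled", "calm"]
def pvKws2 : List String := ["intense", "fiery", "volatile"]

def infer_emotional_expressiveness_py (traits : List String) : String :=
  let traits_lower := if traits.isEmpty then [] else traits.map PySem.Str.lower
  if pvKws0.any (fun trait => traits_lower.contains trait) then "expressive"
  else if pvKws1.any (fun trait => traits_lower.contains trait) then "reserved"
  else if pvKws2.any (fun trait => traits_lower.contains trait) then "dramatic"
  else "moderate"

-- ===== PORT B =====
def pvPriority : PySem.Dict String Nat :=
  PySem.Dict.ofList
    [("dramatic", 0), ("expressive", 0), ("passionate", 0), ("emotional", 0),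
     ("reserved", 1), ("stoic", 1), ("controlled", 1), ("calm", 1),
     ("intense", 2), ("fiery", 2), ("volatile", 2)]

def pvLabels : List String := ["expressive", "reserved", "dramatic", "moderate"]

def infer_emotional_expressiveness_py_alt (traits : List String) : String :=
  let best := traits.foldl (fun b t => min b (pvPriority.getD (PySem.Str.lower t) 3)) 3
  pvLabels.getD best "moderate"

-- ===== PRECONDITION & SPEC =====
def Spec_infer_emotional_expressiveness_py (traits : List String) (out : String) : Prop := out = infer_emotional_expressiveness_py_alt traits
instance (traits : List String) (out : String) : Decidable (Spec_infer_emotional_expressiveness_py traits out) := by unfold Spec_infer_emotional_expressiveness_py; infer_instance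

-- ===== CLAIM (what is proved, stated in full; the proofs are below) =====
def Claim_equal_infer_emotional_expressiveness_py : Prop := ∀ (traits : List String), Dom_infer_emotional_expressiveness_py traits → Spec_infer_emotional_expressiveness_py traits (infer_emotional_expressiveness_py traits)

-- ===== LEMMAS AND PROOFS =====

-- the rank B's dict assigns, characterized by the three keyword lists
set_option maxHeartbeats 2000000 in
theorem pv_prio_eq (s : String) :
    pvPriority.getD s 3 =
      (if s ∈ pvKws0 then 0 else if s ∈ pvKws1 then 1 else if s ∈ pvKws2 then 2 else 3) := by
  have hmk : pvPriority = PySem.Dict.mk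
      [("dramatic", 0), ("expressive", 0), ("passionate", 0), ("emotional", 0),
       ("reserved", 1), ("stoic", 1), ("controlled", 1), ("calm", 1),
       ("intense", 2), ("fiery", 2), ("volatile", 2)] := by decide
  rw [hmk, PySem.Dict.getD_eq_get?_getD]
  simp only [PySem.Dict.get?_mk_cons, pvKws0, pvKws1, pvKws2, List.mem_cons, List.not_mem_nil]
  by_cases h0 : s = "dramatic" <;> by_cases h1 : s = "expressive" <;>
    by_cases h2 : s = "passionate" <;> by_cases h3 : s = "emotional" <;>
    by_cases h4 : s = "reserved" <;> by_cases h5 : s = "stoic" <;>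
    by_cases h6 : s = "controlled" <;> by_cases h7 : s = "calm" <;>
    by_cases h8 : s = "intense" <;> by_cases h9 : s = "fiery" <;>
    by_cases h10 : s = "volatile" <;> simp_all [PySem.Dict.get?] <;> simp_all [eq_comm]

-- the if-chain value of the minimum-rank fold
def pvChain (traits : List String) : Nat :=
  if traits.any (fun t => PySem.Str.lower t ∈ pvKws0) then 0
  else if traits.any (fun t => PySem.Str.lower t ∈ pvKws1) then 1
  else if traits.any (fun t => PySem.Str.lower t ∈ pvKws2) then 2
  else 3

theorem pv_fold_eq (traits : List String) (b : Nat) (hb : b ≤ 3) :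
    traits.foldl (fun b t => min b (pvPriority.getD (PySem.Str.lower t) 3)) b =
      min b (pvChain traits) := by
  induction traits generalizing b with
  | nil => simp [pvChain]; omega
  | cons t l ih =>
    rw [List.foldl_cons, ih _ (by omega), pvChain, pvChain]
    rw [pv_prio_eq (PySem.Str.lower t)]
    simp only [List.any_cons, Bool.or_eq_true, decide_eq_true_eq]
    by_cases h0 : PySem.Str.lower t ∈ pvKws0 <;>
      by_cases h1 : PySem.Str.lower t ∈ pvKws1 <;>
      by_cases h2 : PySem.Str.lower t ∈ pvKws2 <;>
      simp only [h0, h1, h2, if_true, if_false, true_or, false_or] <;>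
      split_ifs <;> simp_all

theorem pv_any_swap (kws traits : List String) :
    kws.any (fun k => (traits.map PySem.Str.lower).contains k) =
      traits.any (fun t => decide (PySem.Str.lower t ∈ kws)) := by
  rw [Bool.eq_iff_iff]
  simp only [List.any_eq_true, List.contains_iff_mem, List.mem_map, decide_eq_true_eq]
  constructor
  · rintro ⟨k, hk, t, ht, rfl⟩; exact ⟨t, ht, hk⟩
  · rintro ⟨t, ht, hk⟩; exact ⟨_, hk, t, ht, rfl⟩

-- ===== VERDICT (by name: the statement is the Claim_ definition above) =====
theorem infer_emotional_expressiveness_py_spec : Claim_equal_infer_emotional_expressiveness_py := by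
  intro traits _
  unfold Spec_infer_emotional_expressiveness_py
  simp only [infer_emotional_expressiveness_py, infer_emotional_expressiveness_py_alt]
  rw [pv_fold_eq _ _ (by omega)]
  have htl : (if traits.isEmpty then [] else traits.map PySem.Str.lower) =
      traits.map PySem.Str.lower := by
    cases traits <;> simp
  rw [htl, pv_any_swap, pv_any_swap, pv_any_swap]
  unfold pvChain
  by_cases h0 : traits.any (fun t => decide (PySem.Str.lower t ∈ pvKws0)) = true <;>
    by_cases h1 : traits.any (fun t => decide (PySem.Str.lower t ∈ pvKws1)) = true <;>
    by_cases h2 : traits.any (fun t => decide (PySem.Str.lower t ∈ pvKws2)) = true <;>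
    simp [h0, h1, h2, pvLabels]
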